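-- pv_equiv track=rewrite | github.com/permCoding/ege-25 | docs/demo-25/файлы/27/27.py | get
-- ===== SOURCE A (Python) =====
-- def get(points):
--     mn, mni = 2**30, 0
--     for i in range(len(points)):
--         smd = 0
--         for j in range(len(points)):
--             x1, y1 = points[i]
--             x2, y2 = points[j]
--             dist = (x2-x1)**2 + (y1-y2)**2
--             smd += dist
--         if smd < mn:
--             mn = smd
--             mni = i
--     return points[mni]
-- ===== SOURCE B (Python) =====
-- def get(points):
--     # O(n): expand sum_j ((xj-xi)^2 + (yi-yj)^2) = n*(xi^2+yi^2) - 2*(xi*Sx + yi*Sy) + Sxx + Syy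
--     n = len(points)
--     sx = sy = sxx = syy = 0
--     for x, y in points:
--         sx += x
--         sy += y
--         sxx += x * x
--         syy += y * y
--     mn = 2 ** 30
--     best = points[0]
--     for x, y in points:
--         smd = n * (x * x + y * y) - 2 * (x * sx + y * sy) + sxx + syy
--         if smd < mn:
--             mn = smd
--             best = (x, y)
--     return best
-- ===== Notes on version B (the rewrite author's own statement) =====
-- stated objective: faster
-- what changed: B precomputes the totals Sx,Sy,Sxx,Syy in one pass and evaluates each point's sum of squared distances by the expanded closed form in O(1), replacing A's inner loop over all points; the selection rule (strict <, running minimum initialized to 2**30) is kept unchanged.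
import Mathlib
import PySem

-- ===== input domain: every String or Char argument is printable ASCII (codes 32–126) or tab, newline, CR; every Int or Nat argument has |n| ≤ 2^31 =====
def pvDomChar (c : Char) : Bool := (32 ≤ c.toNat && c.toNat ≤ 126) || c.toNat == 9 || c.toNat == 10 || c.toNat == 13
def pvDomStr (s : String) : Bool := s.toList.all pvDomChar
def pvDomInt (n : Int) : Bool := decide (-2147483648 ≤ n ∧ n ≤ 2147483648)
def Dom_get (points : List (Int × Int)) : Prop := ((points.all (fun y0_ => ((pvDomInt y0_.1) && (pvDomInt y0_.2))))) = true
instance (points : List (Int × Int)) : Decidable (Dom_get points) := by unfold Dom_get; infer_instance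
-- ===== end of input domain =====

-- B computes each point's sum of squared distances in O(1) from one-pass totals Sx,Sy,Sxx,Syy
-- instead of A's inner loop; A's selection rule (strict <, running min initialized to 2^30) is kept.

-- ===== PORT A =====
def get (points : List (Int × Int)) : Int × Int :=
  let n : Int := points.length
  let st := (PySem.List.pyRange 0 n 1).foldl
    (fun (st : Int × Int) i =>
      let smd := (PySem.List.pyRange 0 n 1).foldl
        (fun smd j =>
          let p1 := PySem.List.pyGetD points i (0, 0)
          let p2 := PySem.List.pyGetD points j (0, 0)
          smd + ((p2.1 - p1.1) ^ 2 + (p1.2 - p2.2) ^ 2)) 0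
      if smd < st.1 then (smd, i) else st) (2 ^ 30, 0)
  PySem.List.pyGetD points st.2 (0, 0)

-- ===== PORT B =====
def get_alt (points : List (Int × Int)) : Int × Int :=
  let n : Int := points.length
  let t := points.foldl
    (fun (t : Int × Int × Int × Int) p =>
      (t.1 + p.1, t.2.1 + p.2, t.2.2.1 + p.1 * p.1, t.2.2.2 + p.2 * p.2)) (0, 0, 0, 0)
  let r := points.foldl
    (fun (st : Int × (Int × Int)) p =>
      let smd := n * (p.1 * p.1 + p.2 * p.2) - 2 * (p.1 * t.1 + p.2 * t.2.1) + t.2.2.1 + t.2.2.2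
      if smd < st.1 then (smd, p) else st) (2 ^ 30, points.headD (0, 0))
  r.2

-- ===== PRECONDITION & SPEC =====
-- Pre_ excludes only the empty list, on which A raises IndexError at points[mni].
def Pre_get (points : List (Int × Int)) : Prop := points ≠ []
instance (points : List (Int × Int)) : Decidable (Pre_get points) := by unfold Pre_get; infer_instance
def pvWitness_get : (List (Int × Int)) := [(1, 2), (3, 4)]

def Spec_get (points : List (Int × Int)) (out : Int × Int) : Prop := out = get_alt points
instance (points : List (Int × Int)) (out : Int × Int) : Decidable (Spec_get points out) := by unfold Spec_get; infer_instance

-- ===== CLAIM (what is proved, stated in full; the proofs are below) =====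
def Claim_equal_get : Prop := ∀ (points : List (Int × Int)), Dom_get points → Pre_get points → Spec_get points (get points)

-- ===== LEMMAS AND PROOFS =====
def pvSX (l : List (Int × Int)) : Int := (l.map (·.1)).sum
def pvSY (l : List (Int × Int)) : Int := (l.map (·.2)).sum
def pvSXX (l : List (Int × Int)) : Int := (l.map (fun p => p.1 * p.1)).sum
def pvSYY (l : List (Int × Int)) : Int := (l.map (fun p => p.2 * p.2)).sum

-- B's closed-form cost of a point
def pvCostB (pts : List (Int × Int)) (p : Int × Int) : Int :=
  (pts.length : Int) * (p.1 * p.1 + p.2 * p.2) - 2 * (p.1 * pvSX pts + p.2 * pvSY pts)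
    + pvSXX pts + pvSYY pts

-- A's inner loop at index i
def pvCostA (pts : List (Int × Int)) (i : Int) : Int :=
  (PySem.List.pyRange 0 (pts.length : Int) 1).foldl
    (fun smd j =>
      let p1 := PySem.List.pyGetD pts i (0, 0)
      let p2 := PySem.List.pyGetD pts j (0, 0)
      smd + ((p2.1 - p1.1) ^ 2 + (p1.2 - p2.2) ^ 2)) 0

-- step functions of the selection loops
def pvStepA (pts : List (Int × Int)) (st : Int × Int) (i : Int) : Int × Int :=
  if pvCostA pts i < st.1 then (pvCostA pts i, i) else st
def pvStepB (pts : List (Int × Int)) (st : Int × (Int × Int)) (p : Int × Int) : Int × (Int × Int) :=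
  if pvCostB pts p < st.1 then (pvCostB pts p, p) else st

-- the ports, re-expressed through the named helpers (definitional)
theorem get_eq (pts : List (Int × Int)) :
    get pts = PySem.List.pyGetD pts
      ((PySem.List.pyRange 0 (pts.length : Int) 1).foldl (pvStepA pts) (2 ^ 30, 0)).2 (0, 0) := rfl

theorem sum_expand (l : List (Int × Int)) (x y c : Int) :
    l.foldl (fun smd q => smd + ((q.1 - x) ^ 2 + (y - q.2) ^ 2)) c
      = c + (l.length : Int) * (x * x + y * y) - 2 * (x * pvSX l + y * pvSY l)
        + pvSXX l + pvSYY l := by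
  induction l generalizing c with
  | nil => simp [pvSX, pvSY, pvSXX, pvSYY]
  | cons q t ih =>
    simp only [List.foldl_cons, ih, pvSX, pvSY, pvSXX, pvSYY, List.map_cons, List.sum_cons,
      List.length_cons]
    push_cast
    ring

theorem costA_eq (pts : List (Int × Int)) (i : Int) :
    pvCostA pts i = pvCostB pts (PySem.List.pyGetD pts i (0, 0)) := by
  unfold pvCostA
  rw [PySem.List.foldl_pyRange_zero_pyGetD' pts ((0 : Int), (0 : Int))
    (fun smd q => smd + ((q.1 - (PySem.List.pyGetD pts i (0, 0)).1) ^ 2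
      + ((PySem.List.pyGetD pts i (0, 0)).2 - q.2) ^ 2)) 0]
  rw [sum_expand]
  unfold pvCostB
  ring

theorem sums_fold (l : List (Int × Int)) (a b c d : Int) :
    l.foldl (fun (t : Int × Int × Int × Int) p =>
        (t.1 + p.1, t.2.1 + p.2, t.2.2.1 + p.1 * p.1, t.2.2.2 + p.2 * p.2)) (a, b, c, d)
      = (a + pvSX l, b + pvSY l, c + pvSXX l, d + pvSYY l) := by
  induction l generalizing a b c d with
  | nil => simp [pvSX, pvSY, pvSXX, pvSYY]
  | cons q t ih =>
    simp only [List.foldl_cons, ih, pvSX, pvSY, pvSXX, pvSYY, List.map_cons, List.sum_cons]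
    refine Prod.ext (by ring) (Prod.ext (by ring) (Prod.ext (by ring) (by ring)))

theorem get_alt_eq (pts : List (Int × Int)) :
    get_alt pts = (pts.foldl (pvStepB pts) (2 ^ 30, pts.headD (0, 0))).2 := by
  unfold get_alt
  rw [sums_fold]
  simp only [zero_add]
  rfl

theorem step_congr (pts : List (Int × Int)) (a : Int × Int) (b : Int × (Int × Int))
    (m : Nat) (hmlt : m < pts.length) (h1 : a.1 = b.1)
    (h2 : PySem.List.pyGetD pts a.2 (0, 0) = b.2) :
    (pvStepA pts a (m : Int)).1 = (pvStepB pts b pts[m]).1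
      ∧ PySem.List.pyGetD pts (pvStepA pts a (m : Int)).2 (0, 0) = (pvStepB pts b pts[m]).2 := by
  have hget : PySem.List.pyGetD pts ((m : Nat) : Int) (0, 0) = pts[m] :=
    PySem.List.pyGetD_natCast pts m (0, 0) ▸ List.getD_eq_getElem pts (0, 0) hmlt
  have hc : pvCostA pts ((m : Nat) : Int) = pvCostB pts pts[m] := by
    rw [costA_eq, hget]
  unfold pvStepA pvStepB
  rw [hc, h1]
  split
  · exact ⟨rfl, hget⟩
  · exact ⟨h1, h2⟩

-- lockstep invariant of the two selection loops
theorem lockstep (pts : List (Int × Int)) (hne : pts ≠ []) :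
    ∀ (m : Nat), m ≤ pts.length →
      (((PySem.List.pyRange 0 (m : Int) 1).foldl (pvStepA pts) (2 ^ 30, 0)).1
        = ((pts.take m).foldl (pvStepB pts) (2 ^ 30, pts.headD (0, 0))).1)
      ∧ PySem.List.pyGetD pts
          ((PySem.List.pyRange 0 (m : Int) 1).foldl (pvStepA pts) (2 ^ 30, 0)).2 (0, 0)
        = ((pts.take m).foldl (pvStepB pts) (2 ^ 30, pts.headD (0, 0))).2 := by
  intro m
  induction m with
  | zero =>
    intro _
    cases pts with
    | nil => exact absurd rfl hne
    | cons q t =>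
      simp [PySem.List.pyRange_one_eq_nil, PySem.List.pyGetD_zero_cons]
  | succ m ih =>
    intro hm
    have hmlt : m < pts.length := Nat.lt_of_succ_le hm
    have ihm := ih (Nat.le_of_lt hmlt)
    have hr : PySem.List.pyRange 0 ((m + 1 : Nat) : Int) 1
        = PySem.List.pyRange 0 (m : Int) 1 ++ [(m : Int)] := by
      push_cast
      exact PySem.List.pyRange_one_succ_right (by omega)
    have ht : pts.take (m + 1) = pts.take m ++ [pts[m]] := by
      rw [List.take_add_one, List.getElem?_eq_getElem hmlt]
      rfl
    rw [hr, ht, List.foldl_append, List.foldl_append]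
    simp only [List.foldl_cons, List.foldl_nil]
    exact step_congr pts _ _ m hmlt ihm.1 ihm.2
-- ===== VERDICT (by name: the statement is the Claim_ definition above) =====
theorem get_spec : Claim_equal_get := by
  intro points _hdom hpre
  unfold Spec_get
  rw [get_eq, get_alt_eq]
  have h := (lockstep points hpre points.length (le_refl _)).2
  rw [List.take_length] at h
  exact h
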